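-- pv_equiv track=rewrite | github.com/recsithes/foml | backend/main.py | edit_one_letter
-- ===== SOURCE A (Python) =====
-- def edit_one_letter(word, allow_swaps=True):
--     letters = 'abcdefghijklmnopqrstuvwxyz'
--     splits = [(word[:i], word[i:]) for i in range(len(word) + 1)]
--     deletes = [L + R[1:] for L, R in splits if R]
--     swaps = [L + R[1] + R[0] + R[2:] for L, R in splits if len(R)>1] if allow_swaps else []
--     replaces = [L + c + R[1:] for L, R in splits if R for c in letters]
--     inserts = [L + c + R for L, R in splits for c in letters]
--     return set(deletes + swaps + replaces + inserts)
-- ===== SOURCE B (Python) =====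
-- def edit_one_letter(word, allow_swaps=True):
--     letters = 'abcdefghijklmnopqrstuvwxyz'
--
--     def deletes(pre, rest):
--         if not rest:
--             return []
--         return [pre + rest[1:]] + deletes(pre + rest[0], rest[1:])
--
--     def swaps(pre, rest):
--         if len(rest) < 2:
--             return []
--         return [pre + rest[1] + rest[0] + rest[2:]] + swaps(pre + rest[0], rest[1:])
--
--     def replaces(pre, rest):
--         if not rest:
--             return []
--         return [pre + c + rest[1:] for c in letters] + replaces(pre + rest[0], rest[1:])
--
--     def inserts(pre, rest):
--         ins = [pre + c + rest for c in letters]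
--         if not rest:
--             return ins
--         return ins + inserts(pre + rest[0], rest[1:])
--
--     sw = swaps('', word) if allow_swaps else []
--     return set(deletes('', word) + sw + replaces('', word) + inserts('', word))
-- ===== Notes on version B (the rewrite author's own statement) =====
-- stated objective: alternative
-- what changed: Replaces the precomputed splits list and index-filtered comprehensions by four structural recursions over the word that carry the growing prefix as an accumulator, so no splits table, no emptiness filters and no slicing by position are needed.
import Mathlib
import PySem

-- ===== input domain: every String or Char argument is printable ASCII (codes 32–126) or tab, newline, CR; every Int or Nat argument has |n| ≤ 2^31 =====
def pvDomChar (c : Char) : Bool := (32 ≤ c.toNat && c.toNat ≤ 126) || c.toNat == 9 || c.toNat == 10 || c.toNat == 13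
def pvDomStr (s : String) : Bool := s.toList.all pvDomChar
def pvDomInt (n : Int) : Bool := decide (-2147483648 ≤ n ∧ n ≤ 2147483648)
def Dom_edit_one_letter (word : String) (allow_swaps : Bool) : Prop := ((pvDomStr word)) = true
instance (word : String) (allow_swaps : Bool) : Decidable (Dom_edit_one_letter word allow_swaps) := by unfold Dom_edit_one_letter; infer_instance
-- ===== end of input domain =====

-- B replaces the splits table and its filtered comprehensions by four prefix-accumulator
-- recursions over the word (a different decomposition, same cost).

def pvLetters : List Char := "abcdefghijklmnopqrstuvwxyz".toList

-- ===== PORT A =====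
def edit_one_letter (word : String) (allow_swaps : Bool) : List String :=
  let w := word.toList
  let splits : List (List Char × List Char) :=
    (PySem.List.pyRange 0 (w.length + 1) 1).map
      (fun i => (PySem.List.slice w none (some i), PySem.List.slice w (some i) none))
  let deletes : List String :=
    (splits.filter (fun LR => !LR.2.isEmpty)).map
      (fun LR => String.ofList (LR.1 ++ PySem.List.slice LR.2 (some 1) none))
  let swaps : List String :=
    if allow_swaps then
      (splits.filter (fun LR => decide (1 < LR.2.length))).map
        (fun LR => String.ofList (LR.1 ++ [PySem.List.pyGetD LR.2 1 ' ', PySem.List.pyGetD LR.2 0 ' ']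
                    ++ PySem.List.slice LR.2 (some 2) none))
    else []
  let replaces : List String :=
    (splits.filter (fun LR => !LR.2.isEmpty)).flatMap
      (fun LR => pvLetters.map (fun c => String.ofList (LR.1 ++ c :: PySem.List.slice LR.2 (some 1) none)))
  let inserts : List String :=
    splits.flatMap (fun LR => pvLetters.map (fun c => String.ofList (LR.1 ++ c :: LR.2)))
  PySem.Set.ofList (deletes ++ swaps ++ replaces ++ inserts)

-- ===== PORT B =====
def pvBDeletes (pre rest : List Char) : List String :=
  match rest with
  | [] => []
  | x :: xs => String.ofList (pre ++ xs) :: pvBDeletes (pre ++ [x]) xs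

def pvBSwaps (pre rest : List Char) : List String :=
  match rest with
  | x :: y :: xs => String.ofList (pre ++ y :: x :: xs) :: pvBSwaps (pre ++ [x]) (y :: xs)
  | _ => []

def pvBReplaces (pre rest : List Char) : List String :=
  match rest with
  | [] => []
  | x :: xs => pvLetters.map (fun c => String.ofList (pre ++ c :: xs)) ++ pvBReplaces (pre ++ [x]) xs

def pvBInserts (pre rest : List Char) : List String :=
  match rest with
  | [] => pvLetters.map (fun c => String.ofList (pre ++ [c]))
  | x :: xs => pvLetters.map (fun c => String.ofList (pre ++ c :: x :: xs)) ++ pvBInserts (pre ++ [x]) xs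

def edit_one_letter_alt (word : String) (allow_swaps : Bool) : List String :=
  let w := word.toList
  let sw := if allow_swaps then pvBSwaps [] w else []
  PySem.Set.ofList (pvBDeletes [] w ++ sw ++ pvBReplaces [] w ++ pvBInserts [] w)

-- ===== PRECONDITION & SPEC =====
def Spec_edit_one_letter (word : String) (allow_swaps : Bool) (out : List String) : Prop := out = edit_one_letter_alt word allow_swaps
instance (word : String) (allow_swaps : Bool) (out : List String) : Decidable (Spec_edit_one_letter word allow_swaps out) := by unfold Spec_edit_one_letter; infer_instance

-- ===== CLAIM (what is proved, stated in full; the proofs are below) =====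
def Claim_equal_edit_one_letter : Prop := ∀ (word : String) (allow_swaps : Bool), Dom_edit_one_letter word allow_swaps → Spec_edit_one_letter word allow_swaps (edit_one_letter word allow_swaps)

-- ===== LEMMAS AND PROOFS =====

-- all splits (prefix, rest) of a word, prefix growing from `pre`
def pvSplits (pre rest : List Char) : List (List Char × List Char) :=
  match rest with
  | [] => [(pre, [])]
  | x :: xs => (pre, x :: xs) :: pvSplits (pre ++ [x]) xs

theorem pvSplits_eq (w pre : List Char) :
    (PySem.List.pyRange 0 (w.length + 1) 1).map
      (fun i => (pre ++ PySem.List.slice w none (some i), PySem.List.slice w (some i) none))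
    = pvSplits pre w := by
  induction w generalizing pre with
  | nil => simp [pvSplits, PySem.List.slice]
  | cons x xs ih =>
    rw [pvSplits, ← ih (pre ++ [x])]
    have h0 : (0 : Int) < (x :: xs).length + 1 := by positivity
    rw [PySem.List.pyRange_one_cons h0, List.map_cons]
    have hshift : PySem.List.pyRange (0 + 1) ((x :: xs).length + 1) 1
        = (PySem.List.pyRange 0 (xs.length + 1) 1).map (fun k => k + 1) := by
      rw [PySem.List.pyRange_one, PySem.List.pyRange_one]
      simp [List.map_map, Function.comp]
      intro a _
      omega
    rw [hshift, List.map_map]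
    congr 1
    · simp [PySem.List.slice]
    · apply List.map_congr_left
      intro i hi
      rw [PySem.List.mem_pyRange_one] at hi
      obtain ⟨h1, h2⟩ := hi
      obtain ⟨n, rfl⟩ := Int.eq_ofNat_of_zero_le h1
      have e1 : PySem.List.slice (x :: xs) none (some ((n : Int) + 1)) = x :: PySem.List.slice xs none (some (n : Int)) := by
        have : ((n : Int) + 1) = ((n + 1 : Nat) : Int) := by push_cast; ring
        rw [this, PySem.List.slice_to_natCast, PySem.List.slice_to_natCast]
        simp [List.take_succ_cons]
      have e2 : PySem.List.slice (x :: xs) (some ((n : Int) + 1)) none = PySem.List.slice xs (some (n : Int)) none := by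
        have : ((n : Int) + 1) = ((n + 1 : Nat) : Int) := by push_cast; ring
        rw [this, PySem.List.slice_from_natCast, PySem.List.slice_from_natCast]
        simp
      simp only [Function.comp, e1, e2]
      simp

theorem pvDeletes_eq (w pre : List Char) :
    ((pvSplits pre w).filter (fun LR => !LR.2.isEmpty)).map
      (fun LR => String.ofList (LR.1 ++ PySem.List.slice LR.2 (some 1) none))
    = pvBDeletes pre w := by
  induction w generalizing pre with
  | nil => simp [pvSplits, pvBDeletes]
  | cons x xs ih =>
    simp only [pvSplits, pvBDeletes, List.filter_cons, List.isEmpty_cons, Bool.not_false,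
      if_pos, List.map_cons, ← ih (pre ++ [x])]
    congr 2
    simp [PySem.List.slice_from_one]

theorem pvSwaps_eq (w pre : List Char) :
    ((pvSplits pre w).filter (fun LR => decide (1 < LR.2.length))).map
      (fun LR => String.ofList (LR.1 ++ [PySem.List.pyGetD LR.2 1 ' ', PySem.List.pyGetD LR.2 0 ' ']
                  ++ PySem.List.slice LR.2 (some 2) none))
    = pvBSwaps pre w := by
  induction w generalizing pre with
  | nil => simp [pvSplits, pvBSwaps]
  | cons x xs ih =>
    cases xs with
    | nil =>
      simp [pvSplits, pvBSwaps]
    | cons y ys =>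
      simp only [pvSplits, pvBSwaps, List.filter_cons, ← ih (pre ++ [x])]
      norm_num
      have h2 : PySem.List.slice (x :: y :: ys) (some 2) none = ys := by
        rw [show (2 : Int) = ((2 : Nat) : Int) from rfl, PySem.List.slice_from_natCast]; simp
      have h1 : PySem.List.pyGetD (x :: y :: ys) 1 ' ' = y := by
        simp [PySem.List.pyGetD_ofNat']
      rw [h1, h2]

theorem pvReplaces_eq (w pre : List Char) :
    ((pvSplits pre w).filter (fun LR => !LR.2.isEmpty)).flatMap
      (fun LR => pvLetters.map (fun c => String.ofList (LR.1 ++ c :: PySem.List.slice LR.2 (some 1) none)))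
    = pvBReplaces pre w := by
  induction w generalizing pre with
  | nil => simp [pvSplits, pvBReplaces]
  | cons x xs ih =>
    simp only [pvSplits, pvBReplaces, List.filter_cons, List.isEmpty_cons, Bool.not_false,
      if_pos, List.flatMap_cons, ← ih (pre ++ [x])]
    congr 1
    apply List.map_congr_left
    intro c _
    simp [PySem.List.slice_from_one]

theorem pvInserts_eq (w pre : List Char) :
    (pvSplits pre w).flatMap (fun LR => pvLetters.map (fun c => String.ofList (LR.1 ++ c :: LR.2)))
    = pvBInserts pre w := by
  induction w generalizing pre with
  | nil => simp [pvSplits, pvBInserts]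
  | cons x xs ih =>
    simp only [pvSplits, pvBInserts, List.flatMap_cons, ← ih (pre ++ [x])]

-- ===== VERDICT (by name: the statement is the Claim_ definition above) =====
theorem edit_one_letter_spec : Claim_equal_edit_one_letter := by
  intro word allow_swaps _
  unfold Spec_edit_one_letter edit_one_letter edit_one_letter_alt
  have hs : (PySem.List.pyRange 0 (word.toList.length + 1) 1).map
      (fun i => (PySem.List.slice word.toList none (some i), PySem.List.slice word.toList (some i) none))
      = pvSplits [] word.toList := by
    have := pvSplits_eq word.toList []
    simpa using this
  cases allow_swaps
  · simp only [hs, pvDeletes_eq, pvReplaces_eq, pvInserts_eq, Bool.false_eq_true, if_false]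
  · simp only [hs, pvDeletes_eq, pvReplaces_eq, pvInserts_eq, if_true]
    rw [pvSwaps_eq]
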